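-- pv_equiv track=rewrite | github.com/alallaqi/go-calma-redact | gocalma/llm_detect.py | _find_best_occurrence
-- ===== SOURCE A (Python) =====
-- def _find_best_occurrence(text: str, substring: str, reported_start: int) -> int:
--     """Return the start index of the occurrence of *substring* in *text*
--     closest to *reported_start*, or -1 if not found.
--     """
--     best_start = -1
--     best_dist = float("inf")
--     pos = 0
--     while True:
--         idx = text.find(substring, pos)
--         if idx == -1:
--             break
--         dist = abs(idx - reported_start)
--         if dist < best_dist:
--             best_dist = dist
--             best_start = idx
--         pos = idx + 1
--     return best_start
-- ===== SOURCE B (Python) =====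
-- def _find_best_occurrence(text: str, substring: str, reported_start: int) -> int:
--     """Two-probe search: the nearest occurrence is either the first one at or
--     after reported_start (str.find) or the last one at or before it (str.rfind);
--     compare their distances, preferring the earlier index on a tie."""
--     anchor = max(reported_start, 0)
--     right = text.find(substring, anchor)
--     left = text.rfind(substring, 0, anchor + len(substring))
--     if left == -1:
--         return right
--     if right == -1:
--         return left
--     return left if abs(left - reported_start) <= abs(right - reported_start) else right
-- ===== Notes on version B (the rewrite author's own statement) =====
-- stated objective: faster
-- what changed: A scans every occurrence with a while-loop of repeated text.find calls keeping a running best; B makes exactly two probes - text.find(substring, anchor) for the nearest occurrence at or after the reported index and text.rfind(substring, 0, anchor+len(substring)) for the nearest one before it - and returns whichever candidate is closer, preferring the earlier on a tie.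
import Mathlib
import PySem

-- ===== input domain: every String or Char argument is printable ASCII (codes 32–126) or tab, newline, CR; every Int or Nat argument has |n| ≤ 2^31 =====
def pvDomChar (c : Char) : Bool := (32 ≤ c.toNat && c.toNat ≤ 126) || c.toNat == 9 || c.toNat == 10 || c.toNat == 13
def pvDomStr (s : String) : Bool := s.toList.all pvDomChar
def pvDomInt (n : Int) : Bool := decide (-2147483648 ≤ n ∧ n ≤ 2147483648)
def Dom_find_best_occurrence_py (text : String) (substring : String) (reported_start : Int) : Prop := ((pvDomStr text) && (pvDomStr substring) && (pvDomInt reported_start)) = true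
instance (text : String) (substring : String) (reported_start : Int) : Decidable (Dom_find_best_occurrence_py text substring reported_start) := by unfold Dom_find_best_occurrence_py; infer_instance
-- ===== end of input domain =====

-- B replaces A's scan over every occurrence (a while-loop of repeated str.find calls keeping a
-- running best) by exactly two probes: str.find for the nearest occurrence at or after the
-- reported index and str.rfind for the nearest one before it (objective: faster, constant factor:
-- no per-occurrence loop).

-- ===== PORT A =====
-- termination helper for the while-loop: str.find past the end of the string is -1
theorem pvFindFromPast (s sub : List Char) (k : Nat) (h : s.length < k) :
    PySem.Chars.findFrom s sub (k : Int) none = -1 := by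
  simp only [PySem.Chars.findFrom]
  split_ifs <;> omega

-- the 'while True' loop of A; pos is always a nonnegative int in Python, carried as Nat;
-- best_dist = float('inf') is modelled as 'none' (the comparison dist < inf is always true)
def findBestLoop (text substring : List Char) (reported_start : Int) (pos : Nat)
    (best_start : Int) (best_dist : Option Int) : Int :=
  let idx := PySem.Chars.findFrom text substring (pos : Int) none
  if h : idx = -1 then best_start
  else
    let dist := |idx - reported_start|
    if (match best_dist with | none => true | some d => decide (dist < d)) then
      findBestLoop text substring reported_start (idx.toNat + 1) idx (some dist)
    else
      findBestLoop text substring reported_start (idx.toNat + 1) best_start best_dist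
termination_by text.length + 1 - pos
decreasing_by
  all_goals {
    have hle : pos ≤ text.length := by
      by_contra hgt
      exact h (pvFindFromPast _ _ _ (Nat.lt_of_not_le hgt))
    have hs := (PySem.Chars.findFrom_natCast_spec text substring pos hle h).1
    have ht : ((PySem.Chars.findFrom text substring (pos : Int) none).toNat : Int)
        = PySem.Chars.findFrom text substring (pos : Int) none := Int.toNat_of_nonneg (by omega)
    omega }

def find_best_occurrence_py (text : String) (substring : String) (reported_start : Int) : Int :=
  findBestLoop text.toList substring.toList reported_start 0 (-1) none

-- ===== PORT B =====
-- Source B line for line: anchor = max(reported_start, 0); right = text.find(substring, anchor);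
-- left = text.rfind(substring, 0, anchor + len(substring)); then the three-way comparison.
def find_best_occurrence_py_alt (text : String) (substring : String) (reported_start : Int) : Int :=
  let anchor := max reported_start 0
  let right := PySem.Chars.findFrom text.toList substring.toList anchor none
  let left := PySem.Chars.rfindFrom text.toList substring.toList 0
      (some (anchor + (substring.toList.length : Int)))
  if left = -1 then right
  else if right = -1 then left
  else if |left - reported_start| ≤ |right - reported_start| then left else right

-- ===== PRECONDITION & SPEC =====
def Spec_find_best_occurrence_py (text : String) (substring : String) (reported_start : Int) (out : Int) : Prop := out = find_best_occurrence_py_alt text substring reported_start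
instance (text : String) (substring : String) (reported_start : Int) (out : Int) : Decidable (Spec_find_best_occurrence_py text substring reported_start out) := by unfold Spec_find_best_occurrence_py; infer_instance

-- ===== CLAIM (what is proved, stated in full; the proofs are below) =====
def Claim_equal_find_best_occurrence_py : Prop := ∀ (text : String) (substring : String) (reported_start : Int), Dom_find_best_occurrence_py text substring reported_start → Spec_find_best_occurrence_py text substring reported_start (find_best_occurrence_py text substring reported_start)

-- ===== LEMMAS AND PROOFS =====

-- the fold step performed by one iteration of A's loop once best_start/best_dist hold a real best
def pvStep (rs : Int) (acc : Option Int) (x : Int) : Option Int :=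
  match acc with
  | none => some x
  | some m => if |x - rs| < |m - rs| then some x else some m

-- the occurrence positions of S in L that are ≥ pos, in increasing order
def pvOccs (L S : List Char) (pos : Nat) : List Nat :=
  (List.range (L.length + 1)).filter
    (fun j => decide (pos ≤ j) && PySem.Chars.startswith (L.drop j) S)

theorem pvPrefixDropInfix (S L : List Char) (p j : Nat) (hpj : p ≤ j) (h : S <+: L.drop j) :
    S <:+: L.drop p := by
  have he : L.drop j = (L.drop p).drop (j - p) := by
    rw [List.drop_drop]; congr 1; omega
  rw [he] at h
  exact h.isInfix.trans (List.drop_suffix _ _).isInfix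

theorem pvFilterRangeMin (m a b : Nat) (q : Nat → Bool) (hab : a ≤ b) (hb : b < m)
    (hq : q b = true) (hmin : ∀ i, a ≤ i → i < b → q i = false) :
    (List.range m).filter (fun j => decide (a ≤ j) && q j)
      = b :: (List.range m).filter (fun j => decide (b + 1 ≤ j) && q j) := by
  induction m with
  | zero => omega
  | succ m ih =>
    rcases Nat.lt_or_ge b m with hbm | hbm
    · rw [List.range_succ, List.filter_append, List.filter_append, ih hbm]
      simp only [List.filter_cons, List.filter_nil]
      have h1 : (decide (a ≤ m) && q m) = (decide (b + 1 ≤ m) && q m) := by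
        have : decide (a ≤ m) = true := by simp; omega
        have : decide (b + 1 ≤ m) = true := by simp; omega
        simp_all
      rw [h1]; simp
    · have hbm' : b = m := by omega
      subst hbm'
      rw [List.range_succ, List.filter_append, List.filter_append]
      have h0 : (List.range b).filter (fun j => decide (a ≤ j) && q j) = [] := by
        rw [List.filter_eq_nil_iff]
        intro j hj
        simp only [List.mem_range] at hj
        by_cases haj : a ≤ j
        · simp [hmin j haj hj]
        · simp [haj]
      have h0' : (List.range b).filter (fun j => decide (b + 1 ≤ j) && q j) = [] := by
        rw [List.filter_eq_nil_iff]
        intro j hj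
        simp only [List.mem_range] at hj
        have : ¬ (b + 1 ≤ j) := by omega
        simp [this]
      rw [h0, h0']
      simp [hq, hab]

theorem pvOccsNilOfFindNeg (L S : List Char) (pos : Nat)
    (hidx : PySem.Chars.findFrom L S (pos : Int) none = -1) : pvOccs L S pos = [] := by
  unfold pvOccs
  rw [List.filter_eq_nil_iff]
  intro j hj
  simp only [List.mem_range] at hj
  by_cases hpj : pos ≤ j
  · by_cases hk : pos ≤ L.length
    · have hni := (PySem.Chars.findFrom_natCast_eq_neg_one_iff L S pos hk).mp hidx
      have : ¬ PySem.Chars.startswith (L.drop j) S = true := by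
        rw [PySem.Chars.startswith_iff]
        intro hpre
        exact hni (pvPrefixDropInfix S L pos j hpj hpre)
      simp [this]
    · omega
  · simp [hpj]

-- A's loop computes the pvStep-fold over the occurrence list
theorem pvLoopEq (L S : List Char) (rs : Int) :
    ∀ (fuel pos : Nat) (acc : Option Int), L.length + 1 - pos ≤ fuel →
    findBestLoop L S rs pos (acc.getD (-1)) (acc.map (fun b => |b - rs|)) =
      (List.foldl (pvStep rs) acc (List.map (fun (j : Nat) => (j : Int)) (pvOccs L S pos))).getD (-1) := by
  intro fuel
  induction fuel with
  | zero =>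
    intro pos acc hf
    have hgt : L.length < pos := by omega
    have hidx := pvFindFromPast L S pos hgt
    rw [findBestLoop, pvOccsNilOfFindNeg L S pos hidx]
    simp [hidx]
  | succ fuel ih =>
    intro pos acc hf
    by_cases hidx : PySem.Chars.findFrom L S (pos : Int) none = -1
    · rw [findBestLoop, pvOccsNilOfFindNeg L S pos hidx]
      simp [hidx]
    · have hk : pos ≤ L.length := by
        by_contra hgt
        exact hidx (pvFindFromPast _ _ _ (Nat.lt_of_not_le hgt))
      set idx := PySem.Chars.findFrom L S (pos : Int) none with hidxdef
      obtain ⟨h1, h2, h3⟩ := PySem.Chars.findFrom_natCast_spec L S pos hk hidx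
      have hcast : ((idx.toNat : Int)) = idx := Int.toNat_of_nonneg (by omega)
      have hub : idx.toNat ≤ L.length := by
        have he := PySem.Chars.findFrom_natCast L S pos hk
        have hfl := PySem.Chars.find_le_length (L.drop pos) S
        rw [List.length_drop] at hfl
        by_cases hf0 : PySem.Chars.find (L.drop pos) S = -1
        · rw [if_pos hf0] at he
          exact absurd (hidxdef.trans he) hidx
        · rw [if_neg hf0] at he
          rw [hidxdef] at hcast
          omega
      have hocc : pvOccs L S pos = idx.toNat :: pvOccs L S (idx.toNat + 1) := by
        unfold pvOccs
        refine pvFilterRangeMin (L.length + 1) pos idx.toNat _ (by omega) (by omega) ?_ ?_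
        · rw [PySem.Chars.startswith_iff]; exact h2
        · intro i hi1 hi2
          rw [Bool.eq_false_iff]
          intro hT
          exact h3 i hi1 hi2 ((PySem.Chars.startswith_iff _ _).mp hT)
      have hfuel : L.length + 1 - (idx.toNat + 1) ≤ fuel := by omega
      rw [findBestLoop]
      rw [dif_neg hidx]
      rcases acc with _ | b
      · simp only [Option.map_none, Option.getD_none]
        rw [if_pos trivial]
        have hih := ih (idx.toNat + 1) (some idx) hfuel
        simp only [Option.map_some, Option.getD_some] at hih
        rw [hih, hocc]
        simp only [List.map_cons, List.foldl_cons]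
        rw [show pvStep rs none ((idx.toNat : Int)) = some ((idx.toNat : Int)) from rfl, hcast]
      · simp only [Option.map_some, Option.getD_some]
        rw [hocc]
        simp only [List.map_cons, List.foldl_cons]
        by_cases hlt : |idx - rs| < |b - rs|
        · rw [if_pos (by exact decide_eq_true hlt)]
          have hih := ih (idx.toNat + 1) (some idx) hfuel
          simp only [Option.map_some, Option.getD_some] at hih
          rw [hih]
          have hstep : pvStep rs (some b) ((idx.toNat : Int)) = some idx := by
            rw [hcast]
            show (if |idx - rs| < |b - rs| then some idx else some b) = some idx
            rw [if_pos hlt]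
          rw [hstep]
        · rw [if_neg (by simp only [decide_eq_true_eq]; exact hlt)]
          have hih := ih (idx.toNat + 1) (some b) hfuel
          simp only [Option.map_some, Option.getD_some] at hih
          rw [hih]
          have hstep : pvStep rs (some b) ((idx.toNat : Int)) = some b := by
            rw [hcast]
            show (if |idx - rs| < |b - rs| then some idx else some b) = some b
            rw [if_neg hlt]
          rw [hstep]

-- getLast? of a filtered range: the greatest b < m satisfying q
theorem pvFilterRangeLast (m b : Nat) (q : Nat → Bool) (hb : b < m) (hq : q b = true)
    (hmax : ∀ i, b < i → i < m → q i = false) :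
    ((List.range m).filter q).getLast? = some b := by
  induction m with
  | zero => omega
  | succ m ih =>
    rw [List.range_succ, List.filter_append]
    rcases Nat.lt_or_ge b m with hbm | hbm
    · rw [show (List.filter q [m]) = [] by simp [hmax m hbm (by omega)]]
      rw [List.append_nil]
      exact ih hbm (fun i h1 h2 => hmax i h1 (by omega))
    · have : b = m := by omega
      subst this
      rw [show (List.filter q [b]) = [b] by simp [hq]]
      simp

-- rfind.go finds the greatest j ≤ k with S a prefix of t.drop j (or -1)
theorem pvGoSpec (t S : List Char) :
    ∀ k : Nat, (PySem.Chars.rfind.go t S k = -1 ∧ ∀ j ≤ k, ¬ S <+: t.drop j) ∨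
      (∃ j : Nat, PySem.Chars.rfind.go t S k = (j : Int) ∧ j ≤ k ∧ S <+: t.drop j ∧
        ∀ i, j < i → i ≤ k → ¬ S <+: t.drop i) := by
  intro k
  induction k with
  | zero =>
    by_cases h : S.isPrefixOf t
    · right
      refine ⟨0, ?_, le_refl 0, ?_, fun i h1 h2 => by omega⟩
      · simp [PySem.Chars.rfind.go, h]
      · simpa using List.isPrefixOf_iff_prefix.mp h
    · left
      constructor
      · simp [PySem.Chars.rfind.go, h]
      · intro j hj
        interval_cases j
        simpa using (fun hp => h (List.isPrefixOf_iff_prefix.mpr (by simpa using hp)))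
  | succ k ih =>
    by_cases h : S.isPrefixOf (t.drop (k+1))
    · right
      refine ⟨k+1, ?_, le_refl _, List.isPrefixOf_iff_prefix.mp h, fun i h1 h2 => by omega⟩
      simp [PySem.Chars.rfind.go, h]
    · have hgo : PySem.Chars.rfind.go t S (k+1) = PySem.Chars.rfind.go t S k := by
        simp [PySem.Chars.rfind.go, h]
      have hnp : ¬ S <+: t.drop (k+1) := fun hp => h (List.isPrefixOf_iff_prefix.mpr hp)
      rcases ih with ⟨he, hall⟩ | ⟨j, he, hjk, hpre, hmax⟩
      · left
        refine ⟨hgo.trans he, fun j hj => ?_⟩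
        rcases Nat.lt_or_ge j (k+1) with h1 | h1
        · exact hall j (by omega)
        · have : j = k+1 := by omega
          subst this; exact hnp
      · right
        refine ⟨j, hgo.trans he, by omega, hpre, fun i h1 h2 => ?_⟩
        rcases Nat.lt_or_ge i (k+1) with h3 | h3
        · exact hmax i h1 (by omega)
        · have : i = k+1 := by omega
          subst this; exact hnp

-- prefix inside a take: S fits before position m
theorem pvPrefixTakeIff (L S : List Char) (m j : Nat) (hj : j ≤ m) :
    S <+: (L.take m).drop j ↔ (S <+: L.drop j ∧ j + S.length ≤ m) := by
  rw [List.drop_take, List.prefix_take_iff]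
  constructor
  · rintro ⟨h1, h2⟩; exact ⟨h1, by omega⟩
  · rintro ⟨h1, h2⟩; exact ⟨h1, by omega⟩

-- keep-fold: once the accumulator is at least as close as everything remaining, it never changes
theorem pvFoldKeep (c : Int) : ∀ (l : List Int) (b : Int),
    (∀ x ∈ l, |b - c| ≤ |x - c|) → List.foldl (pvStep c) (some b) l = some b := by
  intro l
  induction l with
  | nil => intro b _; rfl
  | cons x l ih =>
    intro b hb
    have hx : |b - c| ≤ |x - c| := hb x (by simp)
    have : pvStep c (some b) x = some b := by
      show (if |x - c| < |b - c| then some x else some b) = some b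
      rw [if_neg (by omega)]
    rw [List.foldl_cons, this]
    exact ih b (fun y hy => hb y (by simp [hy]))

-- (y :: l).getLast? spelled with getLastD
theorem pvGetLastCons : ∀ (l : List Int) (y : Int), (y :: l).getLast? = some (l.getLastD y) := by
  intro l
  induction l with
  | nil => intro y; simp
  | cons hd tl ih => intro y; simp [List.getLast?_cons_cons, ih hd, List.getLastD_cons]

-- climb-fold: over a strictly increasing list of nonneg positions all < A0 (= max c 0) the fold
-- always replaces the accumulator, ending at the last element
theorem pvFoldClimb (c A0 : Int) (hA0 : A0 = c ∨ A0 = 0) : ∀ (l : List Int) (a : Int), l.Pairwise (· < ·) →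
    (∀ x ∈ l, 0 ≤ x ∧ x < A0) → 0 ≤ a → a < A0 → (∀ x ∈ l, a < x) →
    List.foldl (pvStep c) (some a) l = some (l.getLastD a) := by
  intro l
  induction l with
  | nil => intro a _ _ _ _ _; rfl
  | cons x l ih =>
    intro a hpw hmem ha0 haM hax
    have hx := hmem x (by simp)
    have haxx := hax x (by simp)
    have hstep : pvStep c (some a) x = some x := by
      show (if |x - c| < |a - c| then some x else some a) = some x
      rw [if_pos (by rw [abs_sub_comm x c, abs_sub_comm a c, Int.abs_eq_natAbs, Int.abs_eq_natAbs]
                     rcases hA0 with h | h <;> omega)]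
    rw [List.foldl_cons, hstep]
    have := ih x (hpw.sublist (List.sublist_cons_self x l)) (fun y hy => hmem y (by simp [hy]))
      hx.1 hx.2 (fun y hy => (List.pairwise_cons.mp hpw).1 y hy)
    rw [this]
    cases l with
    | nil => simp
    | cons hd tl => simp [pvGetLastCons]


-- an increasing range-filter splits at a0 into its part below a0 and its part from a0 up
theorem pvRangeSplit (a : Nat) (q : Nat → Bool) : ∀ (m : Nat),
    (List.range m).filter q =
      (List.range m).filter (fun j => q j && decide (j < a)) ++
      (List.range m).filter (fun j => decide (a ≤ j) && q j) := by
  intro m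
  induction m with
  | zero => simp
  | succ m ih =>
    rcases Nat.lt_or_ge m a with hma | hma
    · have h1 : (List.range (m+1)).filter (fun j => decide (a ≤ j) && q j) = [] := by
        rw [List.filter_eq_nil_iff]
        intro j hj
        simp only [List.mem_range] at hj
        have : ¬ (a ≤ j) := by omega
        simp [this]
      have h2 : (List.range (m+1)).filter (fun j => q j && decide (j < a)) =
          (List.range (m+1)).filter q := by
        apply List.filter_congr
        intro j hj
        simp only [List.mem_range] at hj
        have : j < a := by omega
        simp [this]
      rw [h1, h2, List.append_nil]
    · rw [List.range_succ, List.filter_append, List.filter_append, List.filter_append, ih]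
      have h1 : (List.filter (fun j => q j && decide (j < a)) [m]) = [] := by
        have : ¬ (m < a) := by omega
        simp [this]
      have h2 : (List.filter (fun j => decide (a ≤ j) && q j) [m]) = List.filter q [m] := by
        have hd : decide (a ≤ m) = true := by simpa using hma
        simp [List.filter_cons, hd]
      rw [h1, h2, List.append_nil, List.append_assoc]

-- pvOccs from a start past the end of the string is empty
theorem pvOccsEmptyPast (L S : List Char) (a0 : Nat) (h : L.length < a0) : pvOccs L S a0 = [] := by
  unfold pvOccs
  rw [List.filter_eq_nil_iff]
  intro j hj
  simp only [List.mem_range] at hj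
  have : ¬ (a0 ≤ j) := by omega
  simp [this]

-- str.rfind over a truncated text, as Source B's rfind call produces it
theorem pvRfindFromEq (L S : List Char) (A0 : Int) (h0 : 0 ≤ A0) :
    PySem.Chars.rfindFrom L S 0 (some (A0 + (S.length : Int))) =
      (if PySem.Chars.rfind (L.take (min L.length (A0.toNat + S.length))) S = -1 then -1
       else PySem.Chars.rfind (L.take (min L.length (A0.toNat + S.length))) S) := by
  simp only [PySem.Chars.rfindFrom]
  have he0 : ¬ (A0 + (S.length : Int) < 0) := by omega
  have hst : ¬ ((0 : Int) < 0) := by omega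
  have htoNat : (if (L.length : Int) < A0 + (S.length : Int) then (L.length : Int)
      else A0 + (S.length : Int)).toNat = min L.length (A0.toNat + S.length) := by
    split_ifs with h1 <;> omega
  split_ifs with h1 h2 h3 h4 h5 h6 h7 <;>
    simp_all <;> omega

-- membership in an occurrence list
theorem pvOccsMem (L S : List Char) (p j : Nat) (h : j ∈ pvOccs L S p) :
    p ≤ j ∧ j ≤ L.length ∧ S <+: L.drop j := by
  unfold pvOccs at h
  rw [List.mem_filter, List.mem_range] at h
  obtain ⟨h1, h2⟩ := h
  simp only [Bool.and_eq_true, decide_eq_true_eq, PySem.Chars.startswith_iff] at h2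
  exact ⟨h2.1, by omega, h2.2⟩

-- a successful str.find from k: position, occurrence, minimality, and the cons shape of pvOccs
theorem pvOccsCons (L S : List Char) (k : Nat) (hk : k ≤ L.length)
    (hidx : PySem.Chars.findFrom L S (k : Int) none ≠ -1) :
    ((k : Int) ≤ PySem.Chars.findFrom L S (k : Int) none) ∧
    (PySem.Chars.findFrom L S (k : Int) none).toNat ≤ L.length ∧
    S <+: L.drop (PySem.Chars.findFrom L S (k : Int) none).toNat ∧
    pvOccs L S k = (PySem.Chars.findFrom L S (k : Int) none).toNat ::
      pvOccs L S ((PySem.Chars.findFrom L S (k : Int) none).toNat + 1) ∧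
    (∀ i, k ≤ i → i < (PySem.Chars.findFrom L S (k : Int) none).toNat → ¬ S <+: L.drop i) := by
  obtain ⟨h1, h2, h3⟩ := PySem.Chars.findFrom_natCast_spec L S k hk hidx
  set idx := PySem.Chars.findFrom L S (k : Int) none with hidxdef
  have hcast : ((idx.toNat : Int)) = idx := Int.toNat_of_nonneg (by omega)
  have hub : idx.toNat ≤ L.length := by
    have he := PySem.Chars.findFrom_natCast L S k hk
    have hfl := PySem.Chars.find_le_length (L.drop k) S
    rw [List.length_drop] at hfl
    by_cases hf0 : PySem.Chars.find (L.drop k) S = -1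
    · rw [if_pos hf0] at he
      exact absurd (hidxdef.trans he) hidx
    · rw [if_neg hf0] at he
      rw [hidxdef] at hcast
      omega
  refine ⟨h1, hub, h2, ?_, h3⟩
  unfold pvOccs
  refine pvFilterRangeMin (L.length + 1) k idx.toNat _ (by omega) (by omega) ?_ ?_
  · rw [PySem.Chars.startswith_iff]; exact h2
  · intro i hi1 hi2
    rw [Bool.eq_false_iff]
    intro hT
    exact h3 i hi1 hi2 ((PySem.Chars.startswith_iff _ _).mp hT)

-- ===== main equivalence =====
theorem pvMain (text substring : String) (c : Int) :
    find_best_occurrence_py text substring c = find_best_occurrence_py_alt text substring c := by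
  set L := text.toList with hL
  set S := substring.toList with hS
  set n := L.length with hn
  set A0 : Int := max c 0 with hA0def
  have hA00 : 0 ≤ A0 := le_max_right c 0
  have hcA0 : c ≤ A0 := le_max_left c 0
  have hA0or : A0 = c ∨ A0 = 0 := by
    rcases le_total c 0 with h | h
    · exact Or.inr (max_eq_right h)
    · exact Or.inl (max_eq_left h)
  set a0 := A0.toNat with ha0
  have hcastA0 : ((a0 : Nat) : Int) = A0 := Int.toNat_of_nonneg hA00
  -- A's loop is the fold over all occurrences
  have hA : find_best_occurrence_py text substring c =
      (List.foldl (pvStep c) none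
        (List.map (fun (j : Nat) => (j : Int)) (pvOccs L S 0))).getD (-1) := by
    have h := pvLoopEq L S c (n + 1) 0 none (by omega)
    simpa [find_best_occurrence_py] using h
  -- B is the two-candidate comparison
  set right : Int := PySem.Chars.findFrom L S A0 none with hrightdef
  set left : Int := PySem.Chars.rfindFrom L S 0 (some (A0 + (S.length : Int))) with hleftdef
  have hB : find_best_occurrence_py_alt text substring c =
      (if left = -1 then right else if right = -1 then left
       else if |left - c| ≤ |right - c| then left else right) := rfl
  -- the rfind call reads the text truncated at m
  set m := min n (a0 + S.length) with hmdef
  have hmn : m ≤ n := min_le_left _ _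
  set t := L.take m with htdef
  have htlen : t.length = m := by rw [htdef, List.length_take]; omega
  have hleft : left = (if PySem.Chars.rfind t S = -1 then -1 else PySem.Chars.rfind t S) := by
    rw [hleftdef, pvRfindFromEq L S A0 hA00]
  have hrf : PySem.Chars.rfind t S = PySem.Chars.rfind.go t S m := by
    rw [PySem.Chars.rfind, htlen]
  have htrans : ∀ j : Nat, j ≤ m → (S <+: t.drop j ↔ (S <+: L.drop j ∧ j + S.length ≤ m)) :=
    fun j hj => pvPrefixTakeIff L S m j hj
  have hocc_le : ∀ j : Nat, j ≤ n → j ≤ a0 → S <+: L.drop j → (j ≤ m ∧ S <+: t.drop j) := by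
    intro j h1 h2 h3
    have hlen : S.length ≤ n - j := by
      have h4 := h3.length_le
      rw [List.length_drop] at h4
      omega
    have hjm : j + S.length ≤ m := by omega
    exact ⟨by omega, (htrans j (by omega)).mpr ⟨h3, hjm⟩⟩
  -- the occurrence list splits at a0
  have hhiN : (List.range (n+1)).filter
      (fun j => decide (a0 ≤ j) && (decide (0 ≤ j) && PySem.Chars.startswith (L.drop j) S))
      = pvOccs L S a0 := by
    unfold pvOccs
    apply List.filter_congr
    intro j _
    simp
  set loN := (List.range (n+1)).filter
      (fun j => (decide (0 ≤ j) && PySem.Chars.startswith (L.drop j) S) && decide (j < a0)) with hloN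
  have hXsplit : pvOccs L S 0 = loN ++ pvOccs L S a0 := by
    unfold pvOccs
    rw [pvRangeSplit a0 (fun j => decide (0 ≤ j) && PySem.Chars.startswith (L.drop j) S) (n+1),
        hhiN]
    rfl
  have hloMem : ∀ j ∈ loN, j ≤ n ∧ S <+: L.drop j ∧ j < a0 := by
    intro j hj
    rw [hloN, List.mem_filter, List.mem_range] at hj
    obtain ⟨h1, h2⟩ := hj
    simp only [Bool.and_eq_true, decide_eq_true_eq, PySem.Chars.startswith_iff] at h2
    exact ⟨by omega, h2.1.2, h2.2⟩
  have hloPW : (loN.map (fun j : Nat => (j : Int))).Pairwise (· < ·) := by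
    rw [List.pairwise_map]
    exact ((List.pairwise_lt_range).filter _).imp (fun h => by exact_mod_cast h)
  -- fold over the part below a0 ends at its last element; shared helper facts
  have hkeepHi : ∀ (p : Nat) (b : Int), c ≤ b →
      (∀ j ∈ pvOccs L S p, b < (j : Int)) →
      List.foldl (pvStep c) (some b) ((pvOccs L S p).map (fun j : Nat => (j : Int))) = some b := by
    intro p b hcb hlt
    apply pvFoldKeep
    intro x hx
    rw [List.mem_map] at hx
    obtain ⟨j, hj, rfl⟩ := hx
    have h1 := hlt j hj
    rw [Int.abs_eq_natAbs, Int.abs_eq_natAbs]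
    omega
  rw [hA, hB, hXsplit, List.map_append, List.foldl_append]
  -- case split on the rfind result
  rcases pvGoSpec t S m with ⟨hgoeq, hall⟩ | ⟨j0, hgoeq, hj0m, hj0pre, hj0max⟩
  · -- no occurrence at or before a0: left = -1, A's fold lives entirely in the upper part
    have hleft1 : left = -1 := by rw [hleft, hrf, hgoeq]; simp
    have hnone : ∀ j : Nat, j ≤ n → j ≤ a0 → ¬ S <+: L.drop j := by
      intro j h1 h2 h3
      obtain ⟨hjm, hpt⟩ := hocc_le j h1 h2 h3
      exact hall j hjm hpt
    have hloNil : loN = [] := by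
      rw [List.eq_nil_iff_forall_not_mem]
      intro j hj
      obtain ⟨h1, h2, h3⟩ := hloMem j hj
      exact hnone j h1 (by omega) h2
    rw [hloNil, if_pos hleft1]
    simp only [List.map_nil, List.foldl_nil]
    by_cases hidx : PySem.Chars.findFrom L S ((a0 : Nat) : Int) none = -1
    · have hright1 : right = -1 := by rw [hrightdef, ← hcastA0]; exact hidx
      have hoccNil : pvOccs L S a0 = [] := by
        rcases Nat.lt_or_ge n a0 with hlt | hle
        · exact pvOccsEmptyPast L S a0 hlt
        · exact pvOccsNilOfFindNeg L S a0 hidx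
      rw [hoccNil, hright1]
      simp
    · have hk : a0 ≤ n := by
        by_contra hgt
        exact hidx (pvFindFromPast L S a0 (by omega))
      obtain ⟨h1, h2, h3, h4, h5⟩ := pvOccsCons L S a0 hk hidx
      set idx := PySem.Chars.findFrom L S ((a0 : Nat) : Int) none with hidxd
      have hre : right = idx := by rw [hrightdef, ← hcastA0]
      have hcast : ((idx.toNat : Int)) = idx := Int.toNat_of_nonneg (by omega)
      rw [h4]
      simp only [List.map_cons, List.foldl_cons]
      have hstep0 : pvStep c none ((idx.toNat : Int)) = some idx := by
        show some ((idx.toNat : Int)) = some idx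
        rw [hcast]
      rw [hstep0]
      rw [hkeepHi (idx.toNat + 1) idx (by omega) ?hlt]
      case hlt =>
        intro j hj
        have h6 := (pvOccsMem L S (idx.toNat + 1) j hj).1
        omega
      rw [hre]
      simp
  · -- left = j0, the greatest occurrence at or before a0
    have hj0both := (htrans j0 hj0m).mp hj0pre
    have hj0a0 : j0 ≤ a0 := by omega
    have hj0n : j0 ≤ n := by omega
    have hleftval : left = (j0 : Int) := by
      rw [hleft, hrf, hgoeq]
      rw [if_neg (by omega)]
    have hmax' : ∀ i, j0 < i → i ≤ a0 → i ≤ n → ¬ S <+: L.drop i := by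
      intro i hi1 hi2 hi3 hp
      obtain ⟨him, hpt⟩ := hocc_le i hi3 hi2 hp
      exact hj0max i hi1 him hpt
    have hleftne : ¬ (left = -1) := by omega
    rw [if_neg hleftne]
    by_cases hj0eq : j0 = a0
    · -- the anchor itself is an occurrence: both candidates are a0 and so is A's best
      have hk : a0 ≤ n := by omega
      have hpa0 : S <+: L.drop a0 := by rw [← hj0eq]; exact hj0both.1
      have hidx : PySem.Chars.findFrom L S ((a0 : Nat) : Int) none ≠ -1 := by
        intro hEq
        exact ((PySem.Chars.findFrom_natCast_eq_neg_one_iff L S a0 hk).mp hEq) hpa0.isInfix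
      obtain ⟨h1, h2, h3, h4, h5⟩ := pvOccsCons L S a0 hk hidx
      set idx := PySem.Chars.findFrom L S ((a0 : Nat) : Int) none with hidxd
      have hre : right = idx := by rw [hrightdef, ← hcastA0]
      have hcast : ((idx.toNat : Int)) = idx := Int.toNat_of_nonneg (by omega)
      have hidxeq : idx.toNat = a0 := by
        by_contra hne
        have hgt : a0 < idx.toNat := by omega
        exact h5 a0 (le_refl _) hgt hpa0
      have hridx : right = A0 := by rw [hre, ← hcast, hidxeq, hcastA0]
      have hrightne : ¬ (right = -1) := by omega
      rw [if_neg hrightne]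
      have hlv : left = A0 := by rw [hleftval, hj0eq, hcastA0]
      rw [if_pos (by rw [hlv, hridx])]
      rw [hlv]
      -- A's fold over the upper part, started from any b with 0 ≤ b ≤ A0, ends at A0
      have hfold_hi : ∀ b : Option Int, (∀ x, b = some x → 0 ≤ x ∧ x ≤ A0) →
          List.foldl (pvStep c) b ((pvOccs L S a0).map (fun j : Nat => (j : Int))) = some A0 := by
        intro b hb
        rw [h4]
        simp only [List.map_cons, List.foldl_cons]
        have hstep : pvStep c b ((idx.toNat : Int)) = some A0 := by
          rcases b with _ | x
          · show some ((idx.toNat : Int)) = some A0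
            rw [hidxeq, hcastA0]
          · obtain ⟨hx0, hxA⟩ := hb x rfl
            show (if |(idx.toNat : Int) - c| < |x - c| then some ((idx.toNat : Int)) else some x)
                = some A0
            rw [hidxeq, hcastA0]
            rcases eq_or_lt_of_le hxA with hxe | hxlt
            · subst hxe
              split_ifs <;> rfl
            · rw [if_pos ?hcnd]
              case hcnd =>
                rw [Int.abs_eq_natAbs, Int.abs_eq_natAbs]
                rcases hA0or with h | h <;> omega
        rw [hstep]
        apply hkeepHi (idx.toNat + 1) A0 hcA0
        intro j hj
        have h6 := (pvOccsMem L S (idx.toNat + 1) j hj).1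
        rw [← hcastA0]
        omega
      cases hloc : loN with
      | nil =>
        simp only [List.map_nil, List.foldl_nil]
        rw [hfold_hi none (by intro x hx; cases hx)]
        simp
      | cons y l =>
        simp only [List.map_cons, List.foldl_cons]
        have hmemy : y ∈ loN := by rw [hloc]; simp
        obtain ⟨hy1, hy2, hy3⟩ := hloMem y hmemy
        have hy3' : ((y : Nat) : Int) < A0 := by rw [← hcastA0]; exact_mod_cast hy3
        have hclimb := pvFoldClimb c A0 hA0or (l.map (fun j : Nat => (j : Int))) ((y : Nat) : Int)
          ?pw ?mem (by positivity) hy3' ?ax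
        case pw =>
          have := hloPW
          rw [hloc, List.map_cons] at this
          exact (List.pairwise_cons.mp this).2
        case mem =>
          intro x hx
          rw [List.mem_map] at hx
          obtain ⟨j, hj, rfl⟩ := hx
          have hmemj : j ∈ loN := by rw [hloc]; simp [hj]
          obtain ⟨hj1, hj2, hj3⟩ := hloMem j hmemj
          refine ⟨by positivity, ?_⟩
          rw [← hcastA0]
          exact_mod_cast hj3
        case ax =>
          have := hloPW
          rw [hloc, List.map_cons] at this
          intro x hx
          exact (List.pairwise_cons.mp this).1 x hx
        have hstep0 : pvStep c none ((y : Nat) : Int) = some ((y : Nat) : Int) := rfl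
        rw [hstep0, hclimb]
        set Lv := (l.map (fun j : Nat => (j : Int))).getLastD ((y : Nat) : Int) with hLv
        have hLvmem : Lv ∈ (y : Int) :: l.map (fun j : Nat => (j : Int)) := by
          have := pvGetLastCons (l.map (fun j : Nat => (j : Int))) ((y : Nat) : Int)
          exact List.mem_of_getLast? (by rw [this])
        have hLvlt : 0 ≤ Lv ∧ Lv < A0 := by
          rcases List.mem_cons.mp hLvmem with h | h
          · rw [h]; exact ⟨by positivity, hy3'⟩
          · rw [List.mem_map] at h
            obtain ⟨j, hj, hje⟩ := h
            rw [← hje]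
            have hmemj : j ∈ loN := by rw [hloc]; simp [hj]
            obtain ⟨hj1, hj2, hj3⟩ := hloMem j hmemj
            refine ⟨by positivity, ?_⟩
            rw [← hcastA0]
            exact_mod_cast hj3
        rw [hfold_hi (some Lv) (by intro x hx; cases hx; exact ⟨hLvlt.1, by omega⟩)]
        rfl
    · -- j0 < a0: left is the last element of the lower part
      have hj0lt : j0 < a0 := by omega
      have hlast : loN.getLast? = some j0 := by
        rw [hloN]
        apply pvFilterRangeLast (n+1) j0 _ (by omega)
        · simp only [Bool.and_eq_true, decide_eq_true_eq]
          exact ⟨⟨by omega, (PySem.Chars.startswith_iff _ _).mpr hj0both.1⟩, hj0lt⟩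
        · intro i hi1 hi2
          rw [Bool.eq_false_iff]
          intro hT
          simp only [Bool.and_eq_true, decide_eq_true_eq, PySem.Chars.startswith_iff] at hT
          exact hmax' i hi1 (by omega) (by omega) hT.1.2
      have hfoldlo : List.foldl (pvStep c) none (loN.map (fun j : Nat => (j : Int)))
          = some ((j0 : Nat) : Int) := by
        cases hloc : loN with
        | nil => rw [hloc] at hlast; cases hlast
        | cons y l =>
          simp only [List.map_cons, List.foldl_cons]
          have hmemy : y ∈ loN := by rw [hloc]; simp
          obtain ⟨hy1, hy2, hy3⟩ := hloMem y hmemy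
          have hy3' : ((y : Nat) : Int) < A0 := by rw [← hcastA0]; exact_mod_cast hy3
          have hclimb := pvFoldClimb c A0 hA0or (l.map (fun j : Nat => (j : Int))) ((y : Nat) : Int)
            ?pw ?mem (by positivity) hy3' ?ax
          case pw =>
            have := hloPW
            rw [hloc, List.map_cons] at this
            exact (List.pairwise_cons.mp this).2
          case mem =>
            intro x hx
            rw [List.mem_map] at hx
            obtain ⟨j, hj, rfl⟩ := hx
            have hmemj : j ∈ loN := by rw [hloc]; simp [hj]
            obtain ⟨hj1, hj2, hj3⟩ := hloMem j hmemj
            refine ⟨by positivity, ?_⟩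
            rw [← hcastA0]
            exact_mod_cast hj3
          case ax =>
            have := hloPW
            rw [hloc, List.map_cons] at this
            intro x hx
            exact (List.pairwise_cons.mp this).1 x hx
          have hstep0 : pvStep c none ((y : Nat) : Int) = some ((y : Nat) : Int) := rfl
          rw [hstep0, hclimb]
          -- the last of the mapped list is the cast of loN's last, namely j0
          have hmap : ((loN.map (fun j : Nat => (j : Int))).getLast?) = some ((j0 : Nat) : Int) := by
            rw [List.getLast?_map, hlast]
            rfl
          rw [hloc, List.map_cons, pvGetLastCons] at hmap
          exact hmap
      rw [hfoldlo]
      by_cases hidx : PySem.Chars.findFrom L S ((a0 : Nat) : Int) none = -1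
      · have hright1 : right = -1 := by rw [hrightdef, ← hcastA0]; exact hidx
        have hoccNil : pvOccs L S a0 = [] := by
          rcases Nat.lt_or_ge n a0 with hlt | hle
          · exact pvOccsEmptyPast L S a0 hlt
          · exact pvOccsNilOfFindNeg L S a0 hidx
        rw [hoccNil, hright1]
        simp [hleftval]
      · have hk : a0 ≤ n := by
          by_contra hgt
          exact hidx (pvFindFromPast L S a0 (by omega))
        obtain ⟨h1, h2, h3, h4, h5⟩ := pvOccsCons L S a0 hk hidx
        set idx := PySem.Chars.findFrom L S ((a0 : Nat) : Int) none with hidxd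
        have hre : right = idx := by rw [hrightdef, ← hcastA0]
        have hcast : ((idx.toNat : Int)) = idx := Int.toNat_of_nonneg (by omega)
        have hrightne : ¬ (right = -1) := by omega
        rw [if_neg hrightne]
        have hidxgt : a0 < idx.toNat := by
          rcases eq_or_lt_of_le (show a0 ≤ idx.toNat by omega) with he | hlt
          · exact absurd h3 (by rw [← he]; exact hmax' a0 hj0lt (le_refl _) hk)
          · exact hlt
        rw [h4]
        simp only [List.map_cons, List.foldl_cons]
        have hkeep_rest : ∀ b : Int, |b - c| ≤ |idx - c| →
            List.foldl (pvStep c) (some b)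
              ((pvOccs L S (idx.toNat + 1)).map (fun j : Nat => (j : Int))) = some b := by
          intro b hb
          apply pvFoldKeep
          intro x hx
          rw [List.mem_map] at hx
          obtain ⟨j, hj, rfl⟩ := hx
          have h6 := (pvOccsMem L S (idx.toNat + 1) j hj).1
          have hxgt : idx < ((j : Nat) : Int) := by omega
          have hA0idx : A0 < idx := by rw [← hcastA0]; omega
          have : |idx - c| ≤ |((j : Nat) : Int) - c| := by
            rw [Int.abs_eq_natAbs, Int.abs_eq_natAbs]
            omega
          omega
        by_cases hcmp : |idx - c| < |((j0 : Nat) : Int) - c|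
        · have hstep : pvStep c (some ((j0 : Nat) : Int)) ((idx.toNat : Int)) = some idx := by
            show (if |(idx.toNat : Int) - c| < _ then _ else _) = _
            rw [hcast, if_pos hcmp]
          rw [hstep, hkeep_rest idx (le_refl _)]
          rw [if_neg (by rw [hleftval, hre]; omega)]
          exact hre.symm
        · have hstep : pvStep c (some ((j0 : Nat) : Int)) ((idx.toNat : Int))
              = some ((j0 : Nat) : Int) := by
            show (if |(idx.toNat : Int) - c| < _ then _ else _) = _
            rw [hcast, if_neg hcmp]
          rw [hstep, hkeep_rest ((j0 : Nat) : Int) (by omega)]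
          rw [if_pos (by rw [hleftval, hre]; omega)]
          exact hleftval.symm

-- ===== VERDICT (by name: the statement is the Claim_ definition above) =====
theorem find_best_occurrence_py_spec : Claim_equal_find_best_occurrence_py := by
  intro text substring c _
  unfold Spec_find_best_occurrence_py
  exact pvMain text substring c
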